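-- pv_equiv track=rewrite | github.com/aaaAlexanderaaa/MU-Sketch | data_analyse/hash.py | my_csum16
-- ===== SOURCE A (Python) =====
-- def my_csum16(flowid):
--     mybytes=[]
--     for i in bytes.fromhex('{:026X}'.format(int(flowid,16))):
--         mybytes.append(i)
--     sum=0
--     a1=mybytes[:8]
--     a1.reverse()
--     a2=mybytes[8:12]
--     a2.reverse()
--     a3=mybytes[12]
--     temp=0
--     for a in a1:
--         temp=temp<<8
--         temp+=a
--     sum+=temp
--     temp = 0
--     for a in a2:
--         temp=temp<<8
--         temp+=a
--     sum+=temp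
--     sum+=a3
--     if sum >=pow(2,64):
--         sum=sum%pow(2,64)+1
--     t1=sum>>32
--     t2=sum%pow(2,32)+t1
--     if t2 >=pow(2,32):
--         t2=t2%pow(2,32)+1
--     t3=t2>>16
--     t4=t3+t2%pow(2,16)
--     if t4>=pow(2,16):
--         t4=t4%pow(2,16)+1
--     t5=~t4%pow(2,16)
--     t6=t5>>8
--     t7=(t5%pow(2,8))*pow(2,8)+t6
--     return t7
-- ===== SOURCE B (Python) =====
-- def my_csum16(flowid):
--     data = bytes.fromhex('{:026X}'.format(int(flowid, 16)))
--     acc = data[12]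
--     for i in range(0, 12, 2):
--         acc += data[i] + 256 * data[i + 1]
--     while acc > 0xFFFF:
--         acc = acc % 65536 + acc // 65536
--     t5 = 65535 - acc
--     return (t5 % 256) * 256 + t5 // 256
-- ===== Notes on version B (the rewrite author's own statement) =====
-- stated objective: alternative
-- what changed: Replaces A's chunked little-endian 64-bit + 32-bit + byte accumulation with three hand-written conditional carry folds by the standard ones'-complement recipe: one uniform pass summing little-endian 16-bit words, a single end-around-carry loop, and arithmetic complement/byte-swap.
import Mathlib
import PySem

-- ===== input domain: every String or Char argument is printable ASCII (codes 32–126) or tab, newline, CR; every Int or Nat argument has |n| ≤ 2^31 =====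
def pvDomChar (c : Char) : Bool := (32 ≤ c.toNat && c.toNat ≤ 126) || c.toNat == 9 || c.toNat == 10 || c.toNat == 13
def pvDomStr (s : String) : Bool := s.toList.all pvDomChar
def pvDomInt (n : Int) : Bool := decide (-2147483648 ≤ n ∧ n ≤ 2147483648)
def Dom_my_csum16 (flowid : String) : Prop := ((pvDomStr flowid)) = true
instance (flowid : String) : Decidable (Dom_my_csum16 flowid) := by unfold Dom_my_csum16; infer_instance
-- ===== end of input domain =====

-- B replaces A's chunked 64/32/8-bit accumulation with three conditional carry folds by one
-- uniform little-endian 16-bit word sum with an end-around-carry loop (objective: alternative).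

-- ===== shared helpers: both Pythons start with bytes.fromhex('{:026X}'.format(int(flowid, 16))) =====
-- int(flowid, 16) = PySem.Int.ofStrBase? flowid 16 (none = ValueError)

-- number of hex digits of v ≥ 0 (1 for v = 0), i.e. len('{:X}'.format(v))
def pvHexLen (v : Int) : Nat := (Nat.toDigits 16 v.toNat).length

-- byte count of bytes.fromhex('{:026X}'.format(v)) (the string has max 26 (pvHexLen v) chars)
def pvNBytes (v : Int) : Nat := (max 26 (pvHexLen v)) / 2

-- the first 13 bytes (all either Python reads) of that big-endian byte string; exact for v ≥ 0
def pvBytes13 (v : Int) : List Int :=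
  (List.range 13).map (fun i => v / (256 : Int) ^ (pvNBytes v - 1 - i) % 256)

-- ===== PORT A =====
-- A's tail, straight-line code split at its four basic blocks:
-- if sum >= pow(2,64): sum = sum % pow(2,64) + 1
def aStep1 (s : Int) : Int := if s ≥ 2 ^ 64 then s % 2 ^ 64 + 1 else s
-- t1 = sum >> 32; t2 = sum % 2**32 + t1; if t2 >= 2**32: t2 = t2 % 2**32 + 1
def aStep2 (sum : Int) : Int :=
  let t1 := sum / 2 ^ 32
  let t2 := sum % 2 ^ 32 + t1
  if t2 ≥ 2 ^ 32 then t2 % 2 ^ 32 + 1 else t2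
-- t3 = t2 >> 16; t4 = t3 + t2 % 2**16; if t4 >= 2**16: t4 = t4 % 2**16 + 1
def aStep3 (t2 : Int) : Int :=
  let t3 := t2 / 2 ^ 16
  let t4 := t3 + t2 % 2 ^ 16
  if t4 ≥ 2 ^ 16 then t4 % 2 ^ 16 + 1 else t4
-- t5 = ~t4 % 2**16 (Python ~x = -x-1); t6 = t5 >> 8; t7 = (t5 % 2**8)*2**8 + t6
def aStep4 (t4 : Int) : Int :=
  let t5 := (-t4 - 1) % 2 ^ 16
  let t6 := t5 / 2 ^ 8
  t5 % 2 ^ 8 * 2 ^ 8 + t6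
def aFold (s : Int) : Int := aStep4 (aStep3 (aStep2 (aStep1 s)))

-- checksum of A on the byte list (all operands nonnegative, so Lean / % = Python // %)
def csumACore (mybytes : List Int) : Int :=
  let a1 := (mybytes.take 8).reverse            -- a1 = mybytes[:8]; a1.reverse()
  let a2 := ((mybytes.drop 8).take 4).reverse   -- a2 = mybytes[8:12]; a2.reverse()
  let a3 := mybytes.getD 12 0                   -- a3 = mybytes[12], always in range
  let sum1 := a1.foldl (fun temp a => temp * 256 + a) 0   -- temp<<8 = temp*256
  let sum2 := sum1 + a2.foldl (fun temp a => temp * 256 + a) 0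
  aFold (sum2 + a3)

def my_csum16 (flowid : String) : Int :=
  match PySem.Int.ofStrBase? flowid 16 with
  | none => 0            -- int(flowid, 16) raises ValueError: outside Pre_
  | some v => if v < 0 then 0 else csumACore (pvBytes13 v)   -- v < 0: fromhex raises, outside Pre_

-- ===== PORT B =====
-- end-around-carry loop: while acc > 0xFFFF: acc = acc % 65536 + acc // 65536
def foldCarry (acc : Int) : Int :=
  if h : acc > 65535 then foldCarry (acc % 65536 + acc / 65536) else acc
termination_by acc.toNat
decreasing_by omega

def csumBCore (data : List Int) : Int :=
  let acc0 := data.getD 12 0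
  let acc1 := (PySem.List.pyRange 0 12 2).foldl
      (fun acc i => acc + (data.getD i.toNat 0 + 256 * data.getD (i.toNat + 1) 0)) acc0
  let acc := foldCarry acc1
  let t5 := 65535 - acc
  (t5 % 256) * 256 + t5 / 256

def my_csum16_alt (flowid : String) : Int :=
  match PySem.Int.ofStrBase? flowid 16 with
  | none => 0
  | some v => if v < 0 then 0 else csumBCore (pvBytes13 v)

-- ===== PRECONDITION & SPEC =====
-- Pre_: int(flowid, 16) succeeds with value v ≥ 0 and '{:026X}'.format(v) has even length;
-- otherwise int() or bytes.fromhex raises ValueError in BOTH Pythons (no returning input is excluded)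
def pvPreCheck (flowid : String) : Bool :=
  match PySem.Int.ofStrBase? flowid 16 with
  | some v => decide (0 ≤ v) && decide ((max 26 (pvHexLen v)) % 2 = 0)
  | none => false

def Pre_my_csum16 (flowid : String) : Prop := pvPreCheck flowid = true
instance (flowid : String) : Decidable (Pre_my_csum16 flowid) := by
  unfold Pre_my_csum16; infer_instance

def pvWitness_my_csum16 : String := "1a2b3c"

def Spec_my_csum16 (flowid : String) (out : Int) : Prop := out = my_csum16_alt flowid
instance (flowid : String) (out : Int) : Decidable (Spec_my_csum16 flowid out) := by
  unfold Spec_my_csum16; infer_instance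

-- ===== CLAIM (what is proved, stated in full; the proofs are below) =====
def Claim_equal_my_csum16 : Prop := ∀ (flowid : String), Dom_my_csum16 flowid → Pre_my_csum16 flowid → Spec_my_csum16 flowid (my_csum16 flowid)

-- ===== LEMMAS AND PROOFS =====

lemma emod_sub_65535 (x k : Int) : (x - 65535 * k) % 65535 = x % 65535 := by
  have h : x - 65535 * k = x + (-k) * 65535 := by ring
  rw [h, Int.add_mul_emod_self_right]

lemma aStep1_spec (s : Int) (h0 : 0 ≤ s) (h1 : s < 2 ^ 64 + 2 ^ 33) :
    0 ≤ aStep1 s ∧ aStep1 s < 2 ^ 64 ∧ aStep1 s % 65535 = s % 65535 ∧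
      (0 < s → 0 < aStep1 s) ∧ (s = 0 → aStep1 s = 0) := by
  unfold aStep1
  split_ifs with h
  · have h2 : s % 2 ^ 64 + 1 = s - 65535 * 281479271743489 := by omega
    rw [h2, emod_sub_65535]
    omega
  · omega

lemma aStep2_spec (s : Int) (h0 : 0 ≤ s) (h1 : s < 2 ^ 64) :
    0 ≤ aStep2 s ∧ aStep2 s < 2 ^ 32 ∧ aStep2 s % 65535 = s % 65535 ∧
      (0 < s → 0 < aStep2 s) ∧ (s = 0 → aStep2 s = 0) := by
  unfold aStep2
  dsimp only
  have hqr : s = 4294967296 * (s / 2 ^ 32) + s % 2 ^ 32 := by omega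
  have hx : s % 2 ^ 32 + s / 2 ^ 32 = s - 65535 * (65537 * (s / 2 ^ 32)) := by
    nlinarith [hqr]
  have hmod : (s % 2 ^ 32 + s / 2 ^ 32) % 65535 = s % 65535 := by
    rw [hx, emod_sub_65535]
  split_ifs with h
  · have h2 : (s % 2 ^ 32 + s / 2 ^ 32) % 2 ^ 32 + 1 =
        (s % 2 ^ 32 + s / 2 ^ 32) - 65535 * 65537 := by omega
    rw [h2, emod_sub_65535, hmod]
    omega
  · rw [hmod]; omega

lemma aStep3_spec (s : Int) (h0 : 0 ≤ s) (h1 : s < 2 ^ 32) :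
    0 ≤ aStep3 s ∧ aStep3 s ≤ 65535 ∧ aStep3 s % 65535 = s % 65535 ∧
      (0 < s → 0 < aStep3 s) ∧ (s = 0 → aStep3 s = 0) := by
  unfold aStep3
  dsimp only
  have hx : s / 2 ^ 16 + s % 2 ^ 16 = s - 65535 * (s / 2 ^ 16) := by
    nlinarith [Int.mul_ediv_add_emod s (2 ^ 16)]
  have hmod : (s / 2 ^ 16 + s % 2 ^ 16) % 65535 = s % 65535 := by
    rw [hx, emod_sub_65535]
  split_ifs with h
  · have h2 : (s / 2 ^ 16 + s % 2 ^ 16) % 2 ^ 16 + 1 =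
        (s / 2 ^ 16 + s % 2 ^ 16) - 65535 * 1 := by omega
    rw [h2, emod_sub_65535, hmod]
    omega
  · rw [hmod]; omega

lemma aStep4_spec (t : Int) (h0 : 0 ≤ t) (h1 : t ≤ 65535) :
    aStep4 t = (65535 - t) % 256 * 256 + (65535 - t) / 256 := by
  unfold aStep4; dsimp only; omega

lemma foldCarry_spec (acc : Int) (h : 0 ≤ acc) :
    foldCarry acc % 65535 = acc % 65535 ∧ 0 ≤ foldCarry acc ∧ foldCarry acc ≤ 65535 ∧
      (0 < acc → 0 < foldCarry acc) ∧ (acc = 0 → foldCarry acc = 0) := by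
  induction acc using foldCarry.induct with
  | case1 acc hgt ih =>
      rw [foldCarry, dif_pos hgt]
      obtain ⟨h1, h2, h3, h4, h5⟩ := ih (by omega)
      have hm : (acc % 65536 + acc / 65536) % 65535 = acc % 65535 := by
        have hx : acc % 65536 + acc / 65536 = acc - 65535 * (acc / 65536) := by omega
        rw [hx, emod_sub_65535]
      exact ⟨by omega, h2, h3, fun _ => h4 (by omega), fun hz => by omega⟩
  | case2 acc hle =>
      rw [foldCarry, dif_neg hle]
      exact ⟨rfl, h, by omega, fun h' => h', fun h' => h'⟩

lemma aFold_eq_of (s t : Int) (hs0 : 0 ≤ s) (hs1 : s < 2 ^ 64 + 2 ^ 33)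
    (ht0 : 0 ≤ t) (ht1 : t ≤ 65535) (htm : t % 65535 = s % 65535)
    (htp : 0 < s ↔ 0 < t) :
    aFold s = (65535 - t) % 256 * 256 + (65535 - t) / 256 := by
  obtain ⟨a0, a1, a2, a3, a4⟩ := aStep1_spec s hs0 hs1
  obtain ⟨c0, c1, c2, c3, c4⟩ := aStep2_spec (aStep1 s) a0 a1
  obtain ⟨d0, d1, d2, d3, d4⟩ := aStep3_spec (aStep2 (aStep1 s)) c0 c1
  have hu : aStep3 (aStep2 (aStep1 s)) = t := by
    by_cases hz : s = 0
    · have : aStep3 (aStep2 (aStep1 s)) = 0 := d4 (c4 (a4 hz))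
      omega
    · have hpos : 0 < aStep3 (aStep2 (aStep1 s)) := d3 (c3 (a3 (by omega)))
      have hpt : 0 < t := htp.mp (by omega)
      omega
  unfold aFold
  rw [hu]
  exact aStep4_spec t ht0 ht1

lemma scalar_eq (S W : Int) (hS0 : 0 ≤ S) (hS1 : S < 2 ^ 64 + 2 ^ 33) (hW0 : 0 ≤ W)
    (hWS : W % 65535 = S % 65535) (hiff : S = 0 ↔ W = 0) :
    aFold S = (65535 - foldCarry W) % 256 * 256 + (65535 - foldCarry W) / 256 := by
  obtain ⟨f1, f2, f3, f4, f5⟩ := foldCarry_spec W hW0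
  refine aFold_eq_of S (foldCarry W) hS0 hS1 f2 f3 (by rw [f1, hWS]) ?_
  constructor
  · intro h
    apply f4
    rcases lt_or_eq_of_le hW0 with hlt | heq
    · exact hlt
    · exfalso; rw [hiff.mpr heq.symm] at h; exact lt_irrefl 0 h
  · intro h
    rcases lt_or_eq_of_le hS0 with hlt | heq
    · exact hlt
    · exfalso; rw [f5 (hiff.mp heq.symm)] at h; exact lt_irrefl 0 h

lemma core_eq (b0 b1 b2 b3 b4 b5 b6 b7 b8 b9 b10 b11 b12 : Int)
    (h0 : 0 ≤ b0 ∧ b0 < 256) (h1 : 0 ≤ b1 ∧ b1 < 256) (h2 : 0 ≤ b2 ∧ b2 < 256)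
    (h3 : 0 ≤ b3 ∧ b3 < 256) (h4 : 0 ≤ b4 ∧ b4 < 256) (h5 : 0 ≤ b5 ∧ b5 < 256)
    (h6 : 0 ≤ b6 ∧ b6 < 256) (h7 : 0 ≤ b7 ∧ b7 < 256) (h8 : 0 ≤ b8 ∧ b8 < 256)
    (h9 : 0 ≤ b9 ∧ b9 < 256) (h10 : 0 ≤ b10 ∧ b10 < 256) (h11 : 0 ≤ b11 ∧ b11 < 256)
    (h12 : 0 ≤ b12 ∧ b12 < 256) :
    csumACore [b0, b1, b2, b3, b4, b5, b6, b7, b8, b9, b10, b11, b12] =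
      csumBCore [b0, b1, b2, b3, b4, b5, b6, b7, b8, b9, b10, b11, b12] := by
  have hr : PySem.List.pyRange 0 12 2 = [0, 2, 4, 6, 8, 10] := by decide
  have hA : csumACore [b0, b1, b2, b3, b4, b5, b6, b7, b8, b9, b10, b11, b12] =
      aFold (((((((((0 * 256 + b7) * 256 + b6) * 256 + b5) * 256 + b4) * 256 + b3) * 256 + b2)
          * 256 + b1) * 256 + b0) +
        ((((0 * 256 + b11) * 256 + b10) * 256 + b9) * 256 + b8) + b12) := rfl
  have hB : csumBCore [b0, b1, b2, b3, b4, b5, b6, b7, b8, b9, b10, b11, b12] =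
      (65535 - foldCarry (b12 + (b0 + 256 * b1) + (b2 + 256 * b3) + (b4 + 256 * b5) +
          (b6 + 256 * b7) + (b8 + 256 * b9) + (b10 + 256 * b11))) % 256 * 256 +
        (65535 - foldCarry (b12 + (b0 + 256 * b1) + (b2 + 256 * b3) + (b4 + 256 * b5) +
          (b6 + 256 * b7) + (b8 + 256 * b9) + (b10 + 256 * b11))) / 256 := by
    simp only [csumBCore, hr]
    rfl
  rw [hA, hB]
  apply scalar_eq
  · omega
  · omega
  · omega
  · have hd : b12 + (b0 + 256 * b1) + (b2 + 256 * b3) + (b4 + 256 * b5) +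
        (b6 + 256 * b7) + (b8 + 256 * b9) + (b10 + 256 * b11) =
      (((((((((0 * 256 + b7) * 256 + b6) * 256 + b5) * 256 + b4) * 256 + b3) * 256 + b2)
          * 256 + b1) * 256 + b0) +
        ((((0 * 256 + b11) * 256 + b10) * 256 + b9) * 256 + b8) + b12) -
      65535 * (b2 + 256 * b3 + 65537 * b4 + 16777472 * b5 +
        4295032833 * b6 + 1099528405248 * b7 + b10 + 256 * b11) := by ring
    rw [hd, emod_sub_65535]
  · constructor <;> intro <;> omega

lemma bytes13_eq (v : Int) :
    pvBytes13 v = [v / 256 ^ (pvNBytes v - 1 - 0) % 256, v / 256 ^ (pvNBytes v - 1 - 1) % 256,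
      v / 256 ^ (pvNBytes v - 1 - 2) % 256, v / 256 ^ (pvNBytes v - 1 - 3) % 256,
      v / 256 ^ (pvNBytes v - 1 - 4) % 256, v / 256 ^ (pvNBytes v - 1 - 5) % 256,
      v / 256 ^ (pvNBytes v - 1 - 6) % 256, v / 256 ^ (pvNBytes v - 1 - 7) % 256,
      v / 256 ^ (pvNBytes v - 1 - 8) % 256, v / 256 ^ (pvNBytes v - 1 - 9) % 256,
      v / 256 ^ (pvNBytes v - 1 - 10) % 256, v / 256 ^ (pvNBytes v - 1 - 11) % 256,
      v / 256 ^ (pvNBytes v - 1 - 12) % 256] := by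
  simp [pvBytes13, List.range_succ]

-- ===== VERDICT (by name: the statement is the Claim_ definition above) =====
theorem my_csum16_spec : Claim_equal_my_csum16 := by
  intro flowid _ hpre
  unfold Spec_my_csum16 my_csum16 my_csum16_alt
  unfold Pre_my_csum16 pvPreCheck at hpre
  cases hp : PySem.Int.ofStrBase? flowid 16 with
  | none => simp [hp] at hpre
  | some v =>
      rw [hp] at hpre
      simp only [Bool.and_eq_true, decide_eq_true_eq] at hpre
      change (if v < 0 then (0 : Int) else csumACore (pvBytes13 v)) =
        (if v < 0 then (0 : Int) else csumBCore (pvBytes13 v))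
      rw [if_neg (by omega), if_neg (by omega)]
      rw [bytes13_eq v]
      apply core_eq <;>
        exact ⟨Int.emod_nonneg _ (by norm_num), Int.emod_lt_of_pos _ (by norm_num)⟩
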